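-- pv_equiv track=rewrite | github.com/daniyarzt/Polynomials | 3D-RSK-TMP/boltzman-sampling-for-partitions-with-fixed-ch-volume2.py | range_
-- ===== SOURCE A (Python) =====
-- def range_(vals, freq):
--   l = -1
--   r = -1
--   for x, y in zip(vals, freq):
--     if y > 0:
--       if l == -1:
--         l = x
--       r = x
--   return (l, r)
-- ===== SOURCE B (Python) =====
-- def range_(vals, freq):
--     n = min(len(vals), len(freq))
--     i = 0
--     while i < n and freq[i] <= 0:
--         i += 1
--     if i == n:
--         return (-1, -1)
--     j = n - 1
--     while freq[j] <= 0:
--         j -= 1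
--     return (vals[i], vals[j])
-- ===== Notes on version B (the rewrite author's own statement) =====
-- stated objective: alternative
-- what changed: Replaces A's single accumulator-threaded scan over the whole zipped list by a bidirectional early-exit index search: advance i from the left to the first positive frequency, retreat j from the right to the last one, and read vals[i], vals[j]; the middle of the list is never examined.
-- intended difference: On inputs whose first positive-frequency value is -1 while some other positive-frequency value differs from -1, A's l==-1 sentinel test mistakes the real value -1 for 'unset' and returns as left endpoint the first positive-frequency value different from -1 (e.g. (2,2) on vals=[-1,2], freq=[1,1]), whereas B returns the actual first positive-frequency value (-1,2), which is the intended range. — e.g. on range_([-1, 2], [1, 1]): A returns (2, 2), B returns (-1, 2)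
import Mathlib
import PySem

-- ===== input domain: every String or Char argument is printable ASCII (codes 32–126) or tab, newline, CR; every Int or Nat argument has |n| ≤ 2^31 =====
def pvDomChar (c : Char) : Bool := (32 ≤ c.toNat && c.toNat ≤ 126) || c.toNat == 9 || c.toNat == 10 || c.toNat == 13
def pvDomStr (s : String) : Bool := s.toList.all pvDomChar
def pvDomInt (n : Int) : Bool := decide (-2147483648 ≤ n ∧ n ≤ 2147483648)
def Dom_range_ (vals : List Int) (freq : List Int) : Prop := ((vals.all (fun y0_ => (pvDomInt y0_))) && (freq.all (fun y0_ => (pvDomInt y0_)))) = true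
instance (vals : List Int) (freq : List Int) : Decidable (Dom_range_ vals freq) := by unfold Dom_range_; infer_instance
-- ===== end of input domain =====

-- B replaces A's accumulator-threaded scan by a bidirectional early-exit index search
-- (first positive frequency from the left, last one from the right); A's l==-1 sentinel
-- misreads a genuine first value -1, stated as the intended difference D_range_ below.


-- ===== PORT A =====
def range_ (vals : List Int) (freq : List Int) : Int × Int :=
  (vals.zip freq).foldl
    (fun (s : Int × Int) (q : Int × Int) =>
      if 0 < q.2 then ((if s.1 = -1 then q.1 else s.1), q.1) else s)
    (-1, -1)

-- ===== PORT B =====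
-- 'while i < n and freq[i] <= 0: i += 1' (fuel n - i makes the while loop structural)
def pvFwdGo (freq : List Int) (n : Nat) : Nat → Nat → Nat
  | 0, i => i
  | fuel + 1, i =>
    if i < n then (if freq.getD i 0 ≤ 0 then pvFwdGo freq n fuel (i + 1) else i) else i

def pvFwd (freq : List Int) (n : Nat) (i : Nat) : Nat := pvFwdGo freq n (n - i) i

-- 'while freq[j] <= 0: j -= 1' (the j = 0 base case is a totality guard; in B it is
-- unreachable because a positive frequency exists at or before j when this loop runs)
def pvBwd (freq : List Int) : Nat → Nat
  | 0 => 0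
  | j + 1 => if freq.getD (j + 1) 0 ≤ 0 then pvBwd freq j else j + 1

def range__alt (vals : List Int) (freq : List Int) : Int × Int :=
  let n := min vals.length freq.length
  let i := pvFwd freq n 0
  if i = n then (-1, -1)
  else (vals.getD i 0, vals.getD (pvBwd freq (n - 1)) 0)

-- ===== PRECONDITION & SPEC =====
-- helpers for D_ (input inspection only; neither port uses them):
-- first value whose paired frequency is positive
def pvFirstPos : List Int → List Int → Option Int
  | x :: vs, y :: fs => if 0 < y then some x else pvFirstPos vs fs
  | _, _ => none
-- is there a value ≠ -1 whose paired frequency is positive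
def pvHasPosNe : List Int → List Int → Bool
  | x :: vs, y :: fs => (decide (0 < y) && decide (x ≠ -1)) || pvHasPosNe vs fs
  | _, _ => false

-- On inputs whose first positive-frequency value is -1 while some positive-frequency value
-- differs from -1, A's l==-1 sentinel mistakes the genuine value -1 for 'unset' and returns the
-- first positive-frequency value ≠ -1 as left endpoint; B returns the actual first
-- positive-frequency value, which is the intended range.
def D_range_ (vals : List Int) (freq : List Int) : Prop :=
  pvFirstPos vals freq = some (-1) ∧ pvHasPosNe vals freq = true
instance (vals : List Int) (freq : List Int) : Decidable (D_range_ vals freq) := by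
  unfold D_range_; infer_instance

def Spec_range_ (vals : List Int) (freq : List Int) (out : Int × Int) : Prop :=
  ¬ D_range_ vals freq → out = range__alt vals freq
instance (vals : List Int) (freq : List Int) (out : Int × Int) : Decidable (Spec_range_ vals freq out) := by unfold Spec_range_; infer_instance

def pvDiffWitness_range_ : List Int × List Int := ([-1, 2], [1, 1])
def pvDiffWitnessOut_range_ : (Int × Int) × (Int × Int) := ((2, 2), (-1, 2))

-- ===== CLAIM (what is proved, stated in full; the proofs are below) =====
def Claim_unchanged_range_ : Prop := ∀ (vals : List Int) (freq : List Int), Dom_range_ vals freq → Spec_range_ vals freq (range_ vals freq)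
def Claim_changed_range_ : Prop := Dom_range_ (pvDiffWitness_range_.1) (pvDiffWitness_range_.2) ∧ D_range_ (pvDiffWitness_range_.1) (pvDiffWitness_range_.2) ∧ range_ (pvDiffWitness_range_.1) (pvDiffWitness_range_.2) = pvDiffWitnessOut_range_.1 ∧ range__alt (pvDiffWitness_range_.1) (pvDiffWitness_range_.2) = pvDiffWitnessOut_range_.2 ∧ pvDiffWitnessOut_range_.1 ≠ pvDiffWitnessOut_range_.2
def Claim_exact_range_ : Prop := ∀ (vals : List Int) (freq : List Int), Dom_range_ vals freq → D_range_ vals freq → range_ vals freq ≠ range__alt vals freq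

-- ===== LEMMAS AND PROOFS =====

-- the step function of A's fold
def pvStep (s : Int × Int) (q : Int × Int) : Int × Int :=
  if 0 < q.2 then ((if s.1 = -1 then q.1 else s.1), q.1) else s

-- the positives of a zipped list
def pvP (zs : List (Int × Int)) : List Int :=
  (zs.filter (fun q => decide (0 < q.2))).map Prod.fst

theorem pvP_cons (q : Int × Int) (zs : List (Int × Int)) :
    pvP (q :: zs) = if 0 < q.2 then q.1 :: pvP zs else pvP zs := by
  by_cases h : 0 < q.2 <;> simp [pvP, h]

theorem pvP_append (xs ys : List (Int × Int)) : pvP (xs ++ ys) = pvP xs ++ pvP ys := by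
  simp [pvP, List.filter_append]

theorem range__eq_fold (vals freq : List Int) :
    range_ vals freq = (vals.zip freq).foldl pvStep (-1, -1) := rfl

theorem pvLastD (a r : Int) (l : List Int) : (a :: l).getLast?.getD r = l.getLast?.getD a := by
  cases l with
  | nil => rfl
  | cons b t =>
    rw [List.getLast?_cons_cons, List.getLast?_eq_some_getLast (List.cons_ne_nil b t)]
    rfl

theorem fold_of_ne (zs : List (Int × Int)) (l r : Int) (hl : l ≠ -1) :
    zs.foldl pvStep (l, r) = (l, (pvP zs).getLastD r) := by
  induction zs generalizing r with
  | nil => simp [pvP]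
  | cons q zs ih =>
    by_cases h : 0 < q.2
    · simp [List.foldl_cons, pvStep, h, hl, pvP_cons, ih, pvLastD]
    · simp [List.foldl_cons, pvStep, h, pvP_cons, ih]

theorem pvLastNe (a d : Int) (l : List Int) :
    (a :: l).getLast?.getD d = (a :: l).getLast (List.cons_ne_nil a l) := by
  rw [List.getLast?_eq_some_getLast (List.cons_ne_nil a l)]
  rfl

theorem fold_of_neg (zs : List (Int × Int)) (r : Int) :
    zs.foldl pvStep (-1, r) =
      (((pvP zs).filter (fun x => decide (x ≠ -1))).headD (-1), (pvP zs).getLastD r) := by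
  induction zs generalizing r with
  | nil => simp [pvP]
  | cons q zs ih =>
    by_cases h : 0 < q.2
    · by_cases hx : q.1 = -1
      · simp [List.foldl_cons, pvStep, h, hx, pvP_cons, ih, pvLastD]
      · simp [List.foldl_cons, pvStep, h, hx, pvP_cons, fold_of_ne _ _ _ hx, pvLastD]
    · simp [List.foldl_cons, pvStep, h, pvP_cons, ih]

-- pvFirstPos is the head of the positives list
theorem firstPos_eq_head (vals freq : List Int) :
    pvFirstPos vals freq = (pvP (vals.zip freq)).head? := by
  induction vals generalizing freq with
  | nil => simp [pvFirstPos, pvP]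
  | cons x vs ih =>
    cases freq with
    | nil => simp [pvFirstPos, pvP]
    | cons y fs =>
      by_cases h : 0 < y <;> simp [pvFirstPos, h, List.zip_cons_cons, pvP_cons, ih]

-- pvHasPosNe says some positive-frequency value differs from -1
theorem hasPosNe_eq_any (vals freq : List Int) :
    pvHasPosNe vals freq = (pvP (vals.zip freq)).any (fun x => decide (x ≠ -1)) := by
  induction vals generalizing freq with
  | nil => simp [pvHasPosNe, pvP]
  | cons x vs ih =>
    cases freq with
    | nil => simp [pvHasPosNe, pvP]
    | cons y fs =>
      by_cases h : 0 < y <;>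
        simp [pvHasPosNe, h, List.zip_cons_cons, pvP_cons, ih, List.any_cons]

-- unfolding equations for the fuelled while loop
theorem pvFwd_lt (freq : List Int) (n i : Nat) (h : i < n) :
    pvFwd freq n i = if freq.getD i 0 ≤ 0 then pvFwd freq n (i + 1) else i := by
  unfold pvFwd
  have hfu : n - i = (n - (i + 1)) + 1 := by omega
  rw [hfu, pvFwdGo, if_pos h]

theorem pvFwd_ge (freq : List Int) (n i : Nat) (h : ¬ i < n) :
    pvFwd freq n i = i := by
  unfold pvFwd
  have hfu : n - i = 0 := by omega
  rw [hfu, pvFwdGo]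

-- forward search: pvFwd finds the head of the remaining positives (or n if there is none)
theorem fwd_spec (vals freq : List Int) (i : Nat) (hi : i ≤ (vals.zip freq).length) :
    pvP ((vals.zip freq).drop i) =
      if pvFwd freq ((vals.zip freq).length) i = (vals.zip freq).length then []
      else vals.getD (pvFwd freq ((vals.zip freq).length) i) 0 ::
           pvP ((vals.zip freq).drop (pvFwd freq ((vals.zip freq).length) i + 1)) := by
  by_cases h : i < (vals.zip freq).length
  · have hiv : i < vals.length := by
      have := List.length_zip (l₁ := vals) (l₂ := freq); omega
    have hif : i < freq.length := by
      have := List.length_zip (l₁ := vals) (l₂ := freq); omega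
    have hdrop : (vals.zip freq).drop i = (vals.zip freq)[i] :: (vals.zip freq).drop (i + 1) :=
      List.drop_eq_getElem_cons h
    have hzi : (vals.zip freq)[i] = (vals[i], freq[i]) := List.getElem_zip
    by_cases hf : freq.getD i 0 ≤ 0
    · have hf' : ¬ 0 < freq[i] := by
        rw [List.getD_eq_getElem freq 0 hif] at hf; omega
      have hrec := fwd_spec vals freq (i + 1) (by omega)
      have hp : pvP ((vals.zip freq).drop i) = pvP ((vals.zip freq).drop (i + 1)) := by
        rw [hdrop, pvP_cons, hzi, if_neg hf']
      rw [hp, hrec, pvFwd_lt freq _ i h, if_pos hf]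
    · have hf' : 0 < freq[i] := by
        rw [List.getD_eq_getElem freq 0 hif] at hf; omega
      have hv : pvFwd freq ((vals.zip freq).length) i = i := by
        rw [pvFwd_lt freq _ i h, if_neg hf]
      rw [hv, if_neg (by omega), hdrop, pvP_cons, hzi, if_pos hf']
      rw [List.getD_eq_getElem vals 0 hiv]
  · have hin : i = (vals.zip freq).length := by omega
    rw [pvFwd_ge freq _ i h, if_pos hin, hin, List.drop_length]
    simp [pvP]
termination_by (vals.zip freq).length - i

-- backward search: pvBwd finds the last of the positives of the prefix
theorem bwd_spec (vals freq : List Int) (j : Nat) (hj : j < (vals.zip freq).length)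
    (hne : pvP ((vals.zip freq).take (j + 1)) ≠ []) :
    (pvP ((vals.zip freq).take (j + 1))).getLastD 0 = vals.getD (pvBwd freq j) 0 := by
  induction j with
  | zero =>
    have hiv : 0 < vals.length := by
      have := List.length_zip (l₁ := vals) (l₂ := freq); omega
    have hif : 0 < freq.length := by
      have := List.length_zip (l₁ := vals) (l₂ := freq); omega
    have htake : (vals.zip freq).take 1 = [(vals[0], freq[0])] := by
      rw [show (1 : Nat) = 0 + 1 from rfl, List.take_add_one, List.take_zero,
        List.getElem?_eq_getElem hj, List.getElem_zip]
      rfl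
    rw [htake] at hne ⊢
    by_cases h0 : (0 : Int) < freq[0]
    · simp [pvP, h0, pvBwd, List.getElem?_eq_getElem hiv]
    · simp [pvP, h0] at hne
  | succ j ih =>
    have hiv : j + 1 < vals.length := by
      have := List.length_zip (l₁ := vals) (l₂ := freq); omega
    have hif : j + 1 < freq.length := by
      have := List.length_zip (l₁ := vals) (l₂ := freq); omega
    have htake : (vals.zip freq).take (j + 2)
        = (vals.zip freq).take (j + 1) ++ [(vals[j+1], freq[j+1])] := by
      rw [List.take_add_one]
      have : (vals.zip freq)[j+1]? = some (vals[j+1], freq[j+1]) := by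
        rw [List.getElem?_eq_getElem hj, List.getElem_zip]
      rw [this]
      rfl
    rw [htake, pvP_append] at hne ⊢
    by_cases h1 : 0 < freq[j+1]
    · have hsing : pvP [((vals[j+1] : Int), (freq[j+1] : Int))] = [vals[j+1]] := by
        simp [pvP, h1]
      rw [hsing, List.getLastD_concat]
      have hb : pvBwd freq (j + 1) = j + 1 := by
        rw [pvBwd, if_neg (by rw [List.getD_eq_getElem freq 0 hif]; omega)]
      rw [hb, List.getD_eq_getElem vals 0 hiv]
    · have hsing : pvP [((vals[j+1] : Int), (freq[j+1] : Int))] = [] := by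
        simp [pvP]; omega
      rw [hsing, List.append_nil] at hne ⊢
      have hb : pvBwd freq (j + 1) = pvBwd freq j := by
        rw [pvBwd, if_pos (by rw [List.getD_eq_getElem freq 0 hif]; omega)]
      rw [hb]
      exact ih (by omega) hne

-- B's port computes the endpoints of pvP
theorem alt_eq (vals freq : List Int) :
    range__alt vals freq =
      match pvP (vals.zip freq) with
      | [] => (-1, -1)
      | a :: rest => (a, (a :: rest).getLast (List.cons_ne_nil a rest)) := by
  have hlen : min vals.length freq.length = (vals.zip freq).length :=
    (List.length_zip).symm
  have h0 := fwd_spec vals freq 0 (Nat.zero_le _)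
  rw [List.drop_zero] at h0
  unfold range__alt
  rw [hlen]
  by_cases hfin : pvFwd freq ((vals.zip freq).length) 0 = (vals.zip freq).length
  · rw [if_pos hfin] at h0
    rw [if_pos hfin, h0]
  · rw [if_neg hfin] at h0
    rw [if_neg hfin]
    have hlpos : 0 < (vals.zip freq).length := by
      by_contra hl
      have : (vals.zip freq) = [] := List.eq_nil_of_length_eq_zero (by omega)
      rw [this] at h0
      simp [pvP] at h0
    have hne : pvP ((vals.zip freq).take ((vals.zip freq).length - 1 + 1)) ≠ [] := by
      have : (vals.zip freq).length - 1 + 1 = (vals.zip freq).length := by omega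
      rw [this, List.take_length, h0]
      simp
    have hb := bwd_spec vals freq ((vals.zip freq).length - 1) (by omega) hne
    have hfull : (vals.zip freq).length - 1 + 1 = (vals.zip freq).length := by omega
    rw [hfull, List.take_length] at hb
    rw [h0] at hb ⊢
    rw [← hb]
    simp only [List.getLastD_eq_getLast?, pvLastNe]

-- ===== VERDICT (by name: the statement is the Claim_ definition above) =====
theorem range__spec : Claim_unchanged_range_ := by
  intro vals freq _ hD
  rw [range__eq_fold, fold_of_neg, alt_eq]
  rcases hp : pvP (vals.zip freq) with _ | ⟨a, rest⟩
  · simp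
  · simp only []
    rw [D_range_] at hD
    push_neg at hD
    by_cases ha : a = -1
    · have hno : pvHasPosNe vals freq ≠ true := by
        intro hh
        exact absurd hh (by
          have := hD (by rw [firstPos_eq_head, hp, ha]; rfl)
          simpa using this)
      rw [hasPosNe_eq_any, hp] at hno
      have hall : ∀ x ∈ a :: rest, x = -1 := by
        intro x hx
        by_contra hne
        exact hno (List.any_eq_true.2 ⟨x, hx, by simpa using hne⟩)
      have hfilter : (a :: rest).filter (fun x => decide (x ≠ -1)) = [] := by
        rw [List.filter_eq_nil_iff]
        intro x hx
        simp [hall x hx]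
      subst ha
      rw [hfilter]
      simp [pvLastNe]
    · rw [List.filter_cons, if_pos (by simpa using ha)]
      simp [pvLastNe]

theorem range__changed : Claim_changed_range_ := by unfold Claim_changed_range_; decide

theorem range__tight : Claim_exact_range_ := by
  intro vals freq _ hD heq
  obtain ⟨h1, h2⟩ := hD
  rw [firstPos_eq_head] at h1
  rw [hasPosNe_eq_any] at h2
  rcases hp : pvP (vals.zip freq) with _ | ⟨a, rest⟩
  · rw [hp] at h1; simp at h1
  · rw [hp] at h1 h2
    have ha : a = -1 := by simpa using h1
    have hB1 : (range__alt vals freq).1 = -1 := by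
      rw [alt_eq, hp]; simpa using ha
    have hA : range_ vals freq =
        ((((a :: rest).filter (fun x => decide (x ≠ -1))).headD (-1)),
          (a :: rest).getLastD (-1)) := by
      rw [range__eq_fold, fold_of_neg, hp]
    obtain ⟨x, hx, hxne⟩ : ∃ x ∈ a :: rest, x ≠ -1 := by
      simpa [List.any_eq_true] using h2
    rcases hf : (a :: rest).filter (fun x => decide (x ≠ -1)) with _ | ⟨b, bs⟩
    · have := List.filter_eq_nil_iff.mp hf x hx
      simp [hxne] at this
    · have hb : b ∈ (a :: rest).filter (fun x => decide (x ≠ -1)) := by rw [hf]; simp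
      have hbne : b ≠ -1 := by
        have := List.of_mem_filter hb
        simpa using this
      have hA1 : (range_ vals freq).1 = b := by rw [hA, hf]; rfl
      rw [heq, hB1] at hA1
      exact hbne hA1.symm
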